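-- pv_equiv track=rewrite | github.com/Murazakl/main | I33/tp1/ex7.py | minimum_posi
-- ===== SOURCE A (Python) =====
-- def minimum_posi(L):
-- 	pos = [0]
-- 	mini = L[0]
-- 	i = 1
-- 	while i < len(L):
-- 		if L[i] < mini:
-- 			mini = L[i]
-- 			pos = [i]
-- 		elif L[i] == mini:
-- 			pos.append(i)
-- 		i += 1
-- 	return pos
-- ===== SOURCE B (Python) =====
-- def minimum_posi(L):
--     mini = min(L)
--     return [i for i, x in enumerate(L) if x == mini]
-- ===== Notes on version B (the rewrite author's own statement) =====
-- stated objective: idiomatic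
-- what changed: Replaces A's single combined while-loop that maintains a running minimum and rebuilds the position list on each new minimum with two separate passes: min(L) first, then an enumerate comprehension collecting the positions.
import Mathlib
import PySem

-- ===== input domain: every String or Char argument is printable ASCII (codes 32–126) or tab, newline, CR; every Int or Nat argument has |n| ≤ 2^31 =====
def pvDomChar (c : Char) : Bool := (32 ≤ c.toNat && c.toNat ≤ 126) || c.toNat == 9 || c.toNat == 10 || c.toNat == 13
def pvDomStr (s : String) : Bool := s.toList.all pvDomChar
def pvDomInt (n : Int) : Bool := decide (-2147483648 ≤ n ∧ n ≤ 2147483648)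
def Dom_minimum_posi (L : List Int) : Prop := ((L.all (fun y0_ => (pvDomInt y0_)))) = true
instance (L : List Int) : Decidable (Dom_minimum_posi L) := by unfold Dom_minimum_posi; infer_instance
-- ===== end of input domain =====

-- B: two-pass (min, then enumerate-filter) instead of A's single combined running-minimum loop; return values equal on nonempty lists.


-- ===== PORT A =====
-- the while-loop: state (mini, pos), i running over range(1, len(L))
def minimum_posi (L : List Int) : List Int :=
  let mini := PySem.List.pyGetD L 0 0
  ((PySem.List.pyRange 1 (L.length : Int) 1).foldl
    (fun (s : Int × List Int) i =>
      let x := PySem.List.pyGetD L i 0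
      if x < s.1 then (x, [i]) else if x = s.1 then (s.1, s.2 ++ [i]) else s)
    (mini, [0])).2

-- ===== PORT B =====
def minimum_posi_alt (L : List Int) : List Int :=
  match PySem.List.min? L (fun x => x) with
  | none => []   -- Python's min raises here; excluded by Pre_
  | some mini =>
      (PySem.List.enumerate L 0).filterMap
        (fun p => if p.2 = mini then some p.1 else none)

-- ===== PRECONDITION & SPEC =====
-- A raises IndexError on the empty list (L[0]); excluded.
def Pre_minimum_posi (L : List Int) : Prop := L ≠ []
instance (L : List Int) : Decidable (Pre_minimum_posi L) := by unfold Pre_minimum_posi; infer_instance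
def pvWitness_minimum_posi : List Int := [3, 1, 1, 2]

def Spec_minimum_posi (L : List Int) (out : List Int) : Prop := out = minimum_posi_alt L
instance (L : List Int) (out : List Int) : Decidable (Spec_minimum_posi L out) := by unfold Spec_minimum_posi; infer_instance

-- ===== CLAIM (what is proved, stated in full; the proofs are below) =====
def Claim_equal_minimum_posi : Prop := ∀ (L : List Int), Dom_minimum_posi L → Pre_minimum_posi L → Spec_minimum_posi L (minimum_posi L)

-- ===== LEMMAS AND PROOFS =====

-- the prefix minimum of a :: t after n further elements
def pvMu (a : Int) (t : List Int) (n : Nat) : Int := (t.take n).foldl min a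

-- B's comprehension evaluated on the prefix (a :: t).take (n+1), with mini = pvMu a t n
def pvPi (a : Int) (t : List Int) (n : Nat) : List Int :=
  (PySem.List.enumerate ((a :: t).take (n + 1)) 0).filterMap
    (fun p => if p.2 = pvMu a t n then some p.1 else none)

theorem pvMu_le (a : Int) (t : List Int) (n : Nat) : ∀ y ∈ (a :: t).take (n + 1), pvMu a t n ≤ y := by
  induction t generalizing a n with
  | nil =>
    intro y hy; simp at hy; simp [pvMu, hy]
  | cons b t ih =>
    intro y hy
    cases n with
    | zero => simp at hy; simp [pvMu, hy]
    | succ n =>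
      have h2 := ih (min a b) n
      have hle : (t.take n).foldl min (min a b) ≤ min a b := by
        have := h2 (min a b) (by simp)
        simpa [pvMu] using this
      simp only [List.take_succ_cons, List.mem_cons] at hy
      simp only [pvMu, List.take_succ_cons, List.foldl_cons]
      rcases hy with rfl | rfl | hy
      · exact le_trans hle (min_le_left _ _)
      · exact le_trans hle (min_le_right _ _)
      · have := h2 y (by simp [hy])
        simpa [pvMu] using this

theorem pvMu_succ (a : Int) (t : List Int) (n : Nat) (hn : n < t.length) :
    pvMu a t (n + 1) = min (pvMu a t n) t[n] := by
  have h : t.take (n + 1) = t.take n ++ [t[n]] := by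
    rw [List.take_succ, List.getElem?_eq_getElem hn]; rfl
  rw [pvMu, pvMu, h, List.foldl_append]; rfl

-- the loop invariant: after processing indices 1..n, the state is (pvMu, pvPi) of the prefix
theorem loop_inv (a : Int) (t : List Int) (n : Nat) (h1 : 1 ≤ n) (h2 : n ≤ t.length + 1) :
    (PySem.List.pyRange 1 (n : Int) 1).foldl
      (fun (s : Int × List Int) i =>
        let x := PySem.List.pyGetD (a :: t) i 0
        if x < s.1 then (x, [i]) else if x = s.1 then (s.1, s.2 ++ [i]) else s)
      (PySem.List.pyGetD (a :: t) 0 0, [0])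
    = (pvMu a t (n - 1), pvPi a t (n - 1)) := by
  induction n with
  | zero => omega
  | succ n ih =>
    cases Nat.eq_or_lt_of_le h1 with
    | inl h =>
      -- n + 1 = 1 : empty range, initial state
      have hn0 : n = 0 := by omega
      subst hn0
      simp [PySem.List.pyRange_one_eq_nil (by norm_num : (1:Int) ≤ 1), pvMu, pvPi,
            PySem.List.enumerate, PySem.List.pyGetD_zero_cons]
    | inr h =>
      simp only [Nat.add_sub_cancel]
      have hn1 : 1 ≤ n := by omega
      have hnt : n - 1 < t.length := by omega
      have hrec := ih hn1 (by omega)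
      have hsplit : PySem.List.pyRange 1 ((n + 1 : Nat) : Int) 1
          = PySem.List.pyRange 1 (n : Int) 1 ++ [(n : Int)] := by
        have : ((n + 1 : Nat) : Int) = (n : Int) + 1 := by push_cast; ring
        rw [this, PySem.List.pyRange_one_succ_right (by exact_mod_cast hn1)]
      rw [hsplit, List.foldl_append, hrec]
      -- process index n; the element is t[n-1]
      have hget : PySem.List.pyGetD (a :: t) (n : Int) 0 = t[n - 1] := by
        rw [PySem.List.pyGetD_natCast]
        have : (a :: t).getD n 0 = (a :: t)[n]'(by simp; omega) := List.getD_eq_getElem _ _ (by simp; omega)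
        rw [this]
        cases n with
        | zero => omega
        | succ m => simp
      have hmu : pvMu a t n = min (pvMu a t (n - 1)) t[n - 1] := by
        have := pvMu_succ a t (n - 1) hnt
        have hn' : n - 1 + 1 = n := by omega
        rw [hn'] at this; exact this
      have htake : (a :: t).take (n + 1) = (a :: t).take n ++ [t[n - 1]] := by
        have : (a :: t).take (n + 1) = (a :: t).take n ++ ((a :: t)[n]?).toList := List.take_succ
        rw [this]
        have hlt : n < (a :: t).length := by simp; omega
        rw [List.getElem?_eq_getElem hlt]
        congr 1
        cases n with
        | zero => omega
        | succ m => simp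
      have hlen_take : ((a :: t).take n).length = n := by simp; omega
      have hpi_split : ∀ m : Int, (PySem.List.enumerate ((a :: t).take (n + 1)) 0).filterMap
            (fun p => if p.2 = m then some p.1 else none)
          = (PySem.List.enumerate ((a :: t).take n) 0).filterMap
              (fun p => if p.2 = m then some p.1 else none)
            ++ (if t[n - 1] = m then [(n : Int)] else []) := by
        intro m
        rw [htake, PySem.List.enumerate_append, List.filterMap_append]
        congr 1
        simp only [PySem.List.enumerate_cons, PySem.List.enumerate_nil, hlen_take,
          List.filterMap_cons, List.filterMap_nil, Int.zero_add]
        by_cases hc : t[n - 1] = m <;> simp [hc]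
      have hnm1 : n - 1 + 1 = n := by omega
      simp only [List.foldl_cons, List.foldl_nil, hget]
      by_cases hlt : t[n - 1] < pvMu a t (n - 1)
      · -- new strict minimum: positions reset to [n]
        rw [if_pos hlt]
        have hmu' : pvMu a t n = t[n - 1] := by rw [hmu]; omega
        have hne : ∀ p ∈ PySem.List.enumerate ((a :: t).take n) 0, ¬ (p.2 = t[n - 1]) := by
          intro p hp
          have h2 := PySem.List.map_snd_enumerate ((a :: t).take n) (0 : Int)
          have : p.2 ∈ (a :: t).take n := by
            rw [← h2]; exact List.mem_map_of_mem hp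
          have hle := pvMu_le a t (n - 1) p.2 (by rwa [hnm1])
          omega
        have : pvPi a t n = [(n : Int)] := by
          rw [pvPi, hmu', hpi_split]
          rw [List.filterMap_eq_nil_iff.mpr (by intro p hp; simp [hne p hp])]
          simp
        rw [Prod.mk.injEq]
        exact ⟨hmu'.symm, this.symm⟩
      · rw [if_neg hlt]
        by_cases heq : t[n - 1] = pvMu a t (n - 1)
        · -- equal to current minimum: append position
          rw [if_pos heq]
          have hmu' : pvMu a t n = pvMu a t (n - 1) := by rw [hmu]; omega
          have : pvPi a t n = pvPi a t (n - 1) ++ [(n : Int)] := by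
            rw [pvPi, hmu', hpi_split, if_pos heq, pvPi, hnm1]
          rw [Prod.mk.injEq]
          exact ⟨hmu'.symm, this.symm⟩
        · -- larger: state unchanged
          rw [if_neg heq]
          have hmu' : pvMu a t n = pvMu a t (n - 1) := by rw [hmu]; omega
          have : pvPi a t n = pvPi a t (n - 1) := by
            rw [pvPi, hmu', hpi_split, if_neg heq, pvPi, hnm1, List.append_nil]
          rw [Prod.mk.injEq]
          exact ⟨hmu'.symm, this.symm⟩

-- ===== VERDICT (by name: the statement is the Claim_ definition above) =====
theorem minimum_posi_spec : Claim_equal_minimum_posi := by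
  intro L _ hpre
  cases L with
  | nil => exact absurd rfl hpre
  | cons a t =>
    unfold Spec_minimum_posi minimum_posi minimum_posi_alt
    have hinv := loop_inv a t (t.length + 1) (by omega) (by omega)
    have hlen : ((a :: t).length : Int) = ((t.length + 1 : Nat) : Int) := by simp
    rw [hlen]
    simp only [hinv]
    rw [PySem.List.min?_id_cons]
    have hmu : pvMu a t (t.length + 1 - 1) = t.foldl min a := by
      simp [pvMu]
    have htake : (a :: t).take (t.length + 1 - 1 + 1) = a :: t := by simp
    simp only [pvPi, htake, hmu]
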